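-- pv_equiv track=rewrite | github.com/kenosis6971/prime-emergence | saffron_synthesis_master_v3_gated_monolith.py | segmented_spf
-- ===== SOURCE A (Python) =====
-- from typing import Dict, List, Tuple, Optional
--
-- def segmented_spf(start: int, end: int, base_primes: List[int]) -> List[int]:
--     """
--     Build smallest-prime-factor array for the closed interval [start..end].
--     spf_seg[i] = smallest prime dividing (start + i), or 0 if none set (i.e., the number is prime in segment).
--     start, end >= 2
--     """
--     L = end - start + 1
--     spf_seg = [0] * L
--     for p in base_primes:
--         # First multiple of p in [start..end]
--         m0 = ((start + p - 1) // p) * p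
--         if m0 < p * p:
--             m0 = p * p
--         if m0 > end:
--             continue
--         for m in range(m0, end + 1, p):
--             idx = m - start
--             if spf_seg[idx] == 0:
--                 spf_seg[idx] = p
--     return spf_seg
-- ===== SOURCE B (Python) =====
-- from typing import List
--
-- def segmented_spf(start: int, end: int, base_primes: List[int]) -> List[int]:
--     """Per-position trial division: for each n in [start..end], scan base_primes
--     in their given order and record the first p with n % p == 0 and n >= p*p."""
--     def first_hit(n: int) -> int:
--         for p in base_primes:
--             if n % p == 0 and n >= p * p:
--                 return p
--         return 0
--     return [first_hit(n) for n in range(start, end + 1)]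
-- ===== Notes on version B (the rewrite author's own statement) =====
-- stated objective: simpler
-- what changed: Replaces the segmented sieve (per prime, mark multiples of p from max(ceil(start/p)*p, p*p) into a shared array) by direct per-position trial division: each n in [start..end] independently scans base_primes in order and takes the first p with n % p == 0 and n >= p*p.
-- outside the precondition, e.g. on segmented_spf(2, 10, [-2]): A returns [0, 0, 0, 0, 0, 0, 0, 0, 0], B returns [0, 0, -2, 0, -2, 0, -2, 0, -2]; on segmented_spf(2, 10, [0]): A raises ZeroDivisionError, B raises ZeroDivisionError
import Mathlib
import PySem

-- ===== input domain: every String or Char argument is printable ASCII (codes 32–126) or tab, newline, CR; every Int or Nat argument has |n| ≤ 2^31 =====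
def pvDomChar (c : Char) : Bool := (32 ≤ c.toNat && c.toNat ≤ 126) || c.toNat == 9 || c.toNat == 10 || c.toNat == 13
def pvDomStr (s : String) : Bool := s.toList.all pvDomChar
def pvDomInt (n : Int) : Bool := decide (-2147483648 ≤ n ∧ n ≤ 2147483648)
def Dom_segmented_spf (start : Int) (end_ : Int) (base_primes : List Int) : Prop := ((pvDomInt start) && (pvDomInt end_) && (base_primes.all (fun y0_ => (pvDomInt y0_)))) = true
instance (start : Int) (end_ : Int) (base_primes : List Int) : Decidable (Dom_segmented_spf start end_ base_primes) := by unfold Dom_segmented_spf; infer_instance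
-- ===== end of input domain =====

-- ===== PORT A =====
-- B changes the algorithm (trial division per position instead of a sieve marking multiples); objective: simpler.
-- A-side helpers: the inner marking loop and the per-prime step, transliterated from A.
def segSpfMark (start : Int) (p : Int) (spf : List Int) (m : Int) : List Int :=
  let idx := m - start
  -- 'if spf_seg[idx] == 0: spf_seg[idx] = p'; idx is always in range under Pre_ (all primes ≥ 1)
  if PySem.List.pyGetD spf idx 0 = 0 then PySem.List.pySetD spf idx p else spf

def segSpfPrimeStep (start : Int) (end_ : Int) (spf : List Int) (p : Int) : List Int :=
  let m0 := PySem.Int.floordiv (start + p - 1) p * p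
  let m0' := if m0 < p * p then p * p else m0
  if m0' > end_ then spf
  else (PySem.List.pyRange m0' (end_ + 1) p).foldl (segSpfMark start p) spf

def segmented_spf (start : Int) (end_ : Int) (base_primes : List Int) : List Int :=
  base_primes.foldl (segSpfPrimeStep start end_) (List.replicate (end_ - start + 1).toNat 0)

-- ===== PORT B =====
-- first_hit: first p in base_primes with n % p == 0 and n >= p*p, else 0
def segSpfFirstHit (ps : List Int) (n : Int) : Int :=
  match ps with
  | [] => 0
  | p :: rest => if PySem.Int.mod n p = 0 ∧ p * p ≤ n then p else segSpfFirstHit rest n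

def segmented_spf_alt (start : Int) (end_ : Int) (base_primes : List Int) : List Int :=
  (PySem.List.pyRange start (end_ + 1) 1).map (segSpfFirstHit base_primes)

-- ===== PRECONDITION & SPEC =====
-- Pre_ excludes entries 0 of base_primes (A raises ZeroDivisionError) and negative entries that
-- divide some element n ≥ p*p of the window — such entries are outside the prime-list domain, and
-- there A silently ignores them (its descending range is empty) while B uses them as divisors.
def Pre_segmented_spf (start : Int) (end_ : Int) (base_primes : List Int) : Prop :=
  ∀ p ∈ base_primes, p ≠ 0 ∧
    (p < 0 → ¬ (max start (p * p) ≤ end_ ∧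
                max start (p * p) ≤ PySem.Int.floordiv end_ (-p) * (-p)))
instance (start : Int) (end_ : Int) (base_primes : List Int) : Decidable (Pre_segmented_spf start end_ base_primes) := by unfold Pre_segmented_spf; infer_instance

def pvWitness_segmented_spf : Int × Int × List Int := (2, 10, [2, 3])

def Spec_segmented_spf (start : Int) (end_ : Int) (base_primes : List Int) (out : List Int) : Prop := out = segmented_spf_alt start end_ base_primes
instance (start : Int) (end_ : Int) (base_primes : List Int) (out : List Int) : Decidable (Spec_segmented_spf start end_ base_primes out) := by unfold Spec_segmented_spf; infer_instance

-- ===== CLAIM (what is proved, stated in full; the proofs are below) =====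
def Claim_equal_segmented_spf : Prop := ∀ (start : Int) (end_ : Int) (base_primes : List Int), Dom_segmented_spf start end_ base_primes → Pre_segmented_spf start end_ base_primes → Spec_segmented_spf start end_ base_primes (segmented_spf start end_ base_primes)

-- ===== LEMMAS AND PROOFS =====

-- A negative entry admitted by Pre_ never fires B's test on the window.
lemma neg_no_fire (start end_ p : Int) (hplt : p < 0)
    (h : ¬ (max start (p * p) ≤ end_ ∧
            max start (p * p) ≤ PySem.Int.floordiv end_ (-p) * (-p))) :
    ∀ n ∈ PySem.List.pyRange start (end_ + 1) 1, ¬ (p ∣ n ∧ p * p ≤ n) := by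
  rintro n hn ⟨hd, hsq⟩
  rw [PySem.List.mem_pyRange_one] at hn
  apply h
  have hq : (0 : Int) < -p := by omega
  obtain ⟨k, hk⟩ := (Int.neg_dvd).mpr hd
  have hk1 : k ≤ PySem.Int.floordiv end_ (-p) := by
    rw [PySem.Int.le_floordiv_iff_mul_le hq]
    nlinarith [hn.1, hn.2]
  have hk2 : k * (-p) ≤ PySem.Int.floordiv end_ (-p) * (-p) := by
    have := mul_le_mul_of_nonneg_right hk1 (le_of_lt hq)
    linarith
  have hmaxn : max start (p * p) ≤ n := max_le hn.1 hsq
  have hn2 : n ≤ PySem.Int.floordiv end_ (-p) * (-p) := by nlinarith [hk2]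
  exact ⟨le_trans hmaxn (by omega), le_trans hmaxn hn2⟩

-- Divisibility form of B's per-prime test.
lemma segSpfFirstHit_cons (p : Int) (ps : List Int) (n : Int) :
    segSpfFirstHit (p :: ps) n =
      if p ∣ n ∧ p * p ≤ n then p else segSpfFirstHit ps n := by
  simp [segSpfFirstHit, PySem.Int.mod_eq_zero_iff_dvd]

-- A multiple of p that is ≥ start is ≥ the first multiple of p at or above start.
lemma ceil_mul_le (start p n : Int) (hp : 1 ≤ p) (hdvd : p ∣ n) (hn : start ≤ n) :
    PySem.Int.floordiv (start + p - 1) p * p ≤ n := by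
  obtain ⟨k, rfl⟩ := hdvd
  have hq : PySem.Int.floordiv (start + p - 1) p < k + 1 := by
    rw [PySem.Int.floordiv_lt_iff_lt_mul (by omega)]
    nlinarith
  nlinarith [hq]

-- The first multiple of p at or above start is ≥ start.
lemma start_le_ceil_mul (start p : Int) (hp : 1 ≤ p) :
    start ≤ PySem.Int.floordiv (start + p - 1) p * p := by
  have h1 := PySem.Int.floordiv_mul_add_mod (start + p - 1) p
  have h2 := PySem.Int.mod_lt (start + p - 1) (b := p) (by omega)
  have h3 := PySem.Int.mod_nonneg (start + p - 1) (b := p) (by omega)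
  omega

-- Marking fold: pointwise characterisation.
lemma markFold_char (start end_ p : Int) (hp : 1 ≤ p) :
    ∀ (ms : List Int) (s : List Int),
      (∀ m ∈ ms, start ≤ m ∧ m ≤ end_) →
      s.length = (end_ - start + 1).toNat →
      (ms.foldl (segSpfMark start p) s).length = s.length ∧
      ∀ i : Nat, i < s.length →
        (ms.foldl (segSpfMark start p) s).getD i 0 =
          if (start + (i : Int)) ∈ ms ∧ s.getD i 0 = 0 then p else s.getD i 0 := by
  intro ms
  induction ms with
  | nil => intro s _ _; simp
  | cons m ms ih =>
    intro s hbd hlen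
    obtain ⟨hm1, hm2⟩ := hbd m (List.mem_cons_self)
    have hL : 0 < end_ - start + 1 := by omega
    have hidx0 : 0 ≤ m - start := by omega
    have hidx : (m - start).toNat < s.length := by
      rw [hlen]; omega
    have hmark : segSpfMark start p s m =
        if s.getD (m - start).toNat 0 = 0 then s.set (m - start).toNat p else s := by
      simp only [segSpfMark, PySem.List.pyGetD_of_nonneg s 0 hidx0,
        PySem.List.pySetD_of_nonneg s p hidx0]
    have hlen' : (segSpfMark start p s m).length = s.length := by
      rw [hmark]; split <;> simp
    have hget' : ∀ j : Nat, j < s.length →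
        (segSpfMark start p s m).getD j 0 =
          if j = (m - start).toNat ∧ s.getD j 0 = 0 then p else s.getD j 0 := by
      intro j hj
      rw [hmark]
      by_cases h0 : s.getD (m - start).toNat 0 = 0
      · rw [if_pos h0]
        by_cases hje : j = (m - start).toNat
        · subst hje
          rw [if_pos ⟨rfl, h0⟩]
          simp [List.getD, List.getElem?_set_self hidx]
        · rw [if_neg (by tauto)]
          simp [List.getD, List.getElem?_set_ne (fun h => hje h.symm)]
      · rw [if_neg h0]
        by_cases hje : j = (m - start).toNat
        · subst hje; rw [if_neg (by tauto)]
        · rw [if_neg (by tauto)]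
    obtain ⟨ihlen, ihget⟩ := ih (segSpfMark start p s m)
      (fun x hx => hbd x (List.mem_cons_of_mem _ hx)) (by rw [hlen']; exact hlen)
    constructor
    · simpa [List.foldl_cons, hlen'] using ihlen
    · intro i hi
      have hi' : i < (segSpfMark start p s m).length := by rw [hlen']; exact hi
      rw [List.foldl_cons, ihget i hi', hget' i hi]; simp only [List.mem_cons]
      have hcast : ((start + (i : Int)) = m) ↔ (i = (m - start).toNat) := by omega
      have hpn : ¬ p = 0 := by omega
      by_cases hje : i = (m - start).toNat
      · by_cases h0 : s.getD i 0 = 0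
        · have hc1 : i = (m - start).toNat ∧ s.getD i 0 = 0 := ⟨hje, h0⟩
          have hc2 : ¬ ((start + (i : Int)) ∈ ms ∧ p = 0) := fun h => hpn h.2
          have hc3 : ((start + (i : Int)) = m ∨ (start + (i : Int)) ∈ ms) ∧
              s.getD i 0 = 0 := ⟨Or.inl (hcast.mpr hje), h0⟩
          rw [if_pos hc1, if_neg hc2, if_pos hc3]
        · have hc1 : ¬ (i = (m - start).toNat ∧ s.getD i 0 = 0) := fun h => h0 h.2
          have hc2 : ¬ ((start + (i : Int)) ∈ ms ∧ s.getD i 0 = 0) := fun h => h0 h.2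
          have hc3 : ¬ (((start + (i : Int)) = m ∨ (start + (i : Int)) ∈ ms) ∧
              s.getD i 0 = 0) := fun h => h0 h.2
          rw [if_neg hc1, if_neg hc2, if_neg hc3]
      · have hc1 : ¬ (i = (m - start).toNat ∧ s.getD i 0 = 0) := fun h => hje h.1
        rw [if_neg hc1]
        have hne : ¬ (start + (i : Int)) = m := fun h => hje (hcast.mp h)
        by_cases hcond : (start + (i : Int)) ∈ ms ∧ s.getD i 0 = 0
        · have hc3 : ((start + (i : Int)) = m ∨ (start + (i : Int)) ∈ ms) ∧
              s.getD i 0 = 0 := ⟨Or.inr hcond.1, hcond.2⟩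
          rw [if_pos hcond, if_pos hc3]
        · have hc3 : ¬ (((start + (i : Int)) = m ∨ (start + (i : Int)) ∈ ms) ∧
              s.getD i 0 = 0) := fun h => hcond ⟨h.1.resolve_left hne, h.2⟩
          rw [if_neg hcond, if_neg hc3]

-- Per-prime step: pointwise characterisation.
lemma primeStep_char (start end_ p : Int) (hp : 1 ≤ p) (s : List Int)
    (hs : s.length = (end_ - start + 1).toNat) :
    (segSpfPrimeStep start end_ s p).length = s.length ∧
    ∀ i : Nat, i < s.length →
      (segSpfPrimeStep start end_ s p).getD i 0 =
        if s.getD i 0 = 0 ∧ p ∣ (start + (i : Int)) ∧ p * p ≤ start + (i : Int) then p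
        else s.getD i 0 := by
  unfold segSpfPrimeStep
  set c := PySem.Int.floordiv (start + p - 1) p * p with hc
  set m0 := if c < p * p then p * p else c with hm0
  have hdvd_m0 : p ∣ m0 := by
    rw [hm0]; split
    · exact ⟨p, rfl⟩
    · exact ⟨PySem.Int.floordiv (start + p - 1) p, mul_comm _ _⟩
  have hstart_m0 : start ≤ m0 := by
    have := start_le_ceil_mul start p hp
    rw [hm0]; split <;> omega
  -- the condition of B's test at n, in terms of reaching m0
  have hcond : ∀ n : Int, start ≤ n → (p ∣ n ∧ p * p ≤ n → m0 ≤ n) := by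
    intro n hn ⟨hd, hsq⟩
    have := ceil_mul_le start p n hp hd hn
    rw [hm0]; split <;> omega
  by_cases hskip : m0 > end_
  · rw [if_pos hskip]
    refine ⟨rfl, fun i hi => ?_⟩
    have hni : start + (i : Int) ≤ end_ := by rw [hs] at hi; omega
    rw [if_neg]
    rintro ⟨-, hd, hsq⟩
    exact absurd (hcond _ (by omega) ⟨hd, hsq⟩) (by omega)
  · rw [if_neg hskip]
    have hbd : ∀ m ∈ PySem.List.pyRange m0 (end_ + 1) p, start ≤ m ∧ m ≤ end_ := by
      intro m hm
      obtain ⟨h1, h2, -⟩ := (PySem.List.mem_pyRange_iff_of_pos (by omega) m).mp hm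
      exact ⟨le_trans hstart_m0 h1, by omega⟩
    obtain ⟨hlen, hget⟩ := markFold_char start end_ p hp (PySem.List.pyRange m0 (end_ + 1) p) s hbd hs
    refine ⟨hlen, fun i hi => ?_⟩
    rw [hget i hi]
    have hni : start ≤ start + (i : Int) ∧ start + (i : Int) ≤ end_ := by rw [hs] at hi; omega
    have hmem : (start + (i : Int)) ∈ PySem.List.pyRange m0 (end_ + 1) p ↔
        (p ∣ (start + (i : Int)) ∧ p * p ≤ start + (i : Int)) := by
      rw [PySem.List.mem_pyRange_iff_of_pos (by omega)]
      constructor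
      · rintro ⟨h1, h2, h3⟩
        have hd : p ∣ (start + (i : Int)) := by simpa using dvd_add h3 hdvd_m0
        have hsqm0 : p * p ≤ m0 := by rw [hm0]; split <;> omega
        exact ⟨hd, by omega⟩
      · rintro ⟨hd, hsq⟩
        exact ⟨hcond _ hni.1 ⟨hd, hsq⟩, by omega, (dvd_sub hd hdvd_m0)⟩
    by_cases hB : s.getD i 0 = 0 ∧ p ∣ (start + (i : Int)) ∧ p * p ≤ start + (i : Int)
    · rw [if_pos (⟨hmem.mpr ⟨hB.2.1, hB.2.2⟩, hB.1⟩ :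
        (start + (i : Int)) ∈ PySem.List.pyRange m0 (end_ + 1) p ∧ s.getD i 0 = 0), if_pos hB]
    · rw [if_neg (fun h => hB ⟨h.2, hmem.mp h.1⟩), if_neg hB]

-- Outer fold over the primes: the array computes segSpfFirstHit on untouched cells.
lemma outerFold_char (start end_ : Int) :
    ∀ (ps : List Int) (s : List Int),
      (∀ p ∈ ps, p ≠ 0 ∧
        (p < 0 → ∀ n ∈ PySem.List.pyRange start (end_ + 1) 1, ¬ (p ∣ n ∧ p * p ≤ n))) →
      s.length = (end_ - start + 1).toNat →
      (ps.foldl (segSpfPrimeStep start end_) s).length = s.length ∧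
      ∀ i : Nat, i < s.length →
        (ps.foldl (segSpfPrimeStep start end_) s).getD i 0 =
          if s.getD i 0 = 0 then segSpfFirstHit ps (start + (i : Int)) else s.getD i 0 := by
  intro ps
  induction ps with
  | nil =>
    intro s _ _
    refine ⟨rfl, fun i hi => ?_⟩
    rw [List.foldl_nil]
    by_cases h0 : s.getD i 0 = 0
    · rw [if_pos h0, h0]; rfl
    · rw [if_neg h0]
  | cons p ps ih =>
    intro s hpos hlen
    obtain ⟨hpn, hneg⟩ := hpos p List.mem_cons_self
    by_cases hp : 1 ≤ p
    case neg =>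
      -- p < 0: A's per-prime step is a no-op, and B's test never fires on the window
      have hplt : p < 0 := by omega
      have hstep : segSpfPrimeStep start end_ s p = s := by
        unfold segSpfPrimeStep
        set c := PySem.Int.floordiv (start + p - 1) p * p with hc
        set m0 := if c < p * p then p * p else c with hm0
        by_cases hskip : m0 > end_
        · rw [if_pos hskip]
        · rw [if_neg hskip]
          have hnil : PySem.List.pyRange m0 (end_ + 1) p = [] := by
            simp only [PySem.List.pyRange, if_neg hpn, if_neg (by omega : ¬ (0:Int) < p)]
            rw [if_neg (by omega)]
            simp
          rw [hnil, List.foldl_nil]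
      obtain ⟨hl2, hg2⟩ := ih s (fun q hq => hpos q (List.mem_cons_of_mem _ hq)) hlen
      refine ⟨by rw [List.foldl_cons, hstep, hl2], fun i hi => ?_⟩
      rw [List.foldl_cons, hstep, hg2 i hi, segSpfFirstHit_cons]
      have hmem : (start + (i : Int)) ∈ PySem.List.pyRange start (end_ + 1) 1 := by
        rw [PySem.List.mem_pyRange_one]
        rw [hlen] at hi; omega
      rw [if_neg (hneg hplt _ hmem)]
    case pos =>
      have hpn : ¬ p = 0 := by omega
      obtain ⟨hl1, hg1⟩ := primeStep_char start end_ p hp s hlen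
      obtain ⟨hl2, hg2⟩ := ih (segSpfPrimeStep start end_ s p)
        (fun q hq => hpos q (List.mem_cons_of_mem _ hq)) (by rw [hl1]; exact hlen)
      refine ⟨by rw [List.foldl_cons, hl2, hl1], fun i hi => ?_⟩
      have hi' : i < (segSpfPrimeStep start end_ s p).length := by rw [hl1]; exact hi
      rw [List.foldl_cons, hg2 i hi', hg1 i hi, segSpfFirstHit_cons]
      by_cases h0 : s.getD i 0 = 0
      · by_cases hC : p ∣ (start + (i : Int)) ∧ p * p ≤ start + (i : Int)
        · have hc1 : s.getD i 0 = 0 ∧ p ∣ (start + (i : Int)) ∧ p * p ≤ start + (i : Int) :=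
            ⟨h0, hC⟩
          rw [if_pos hc1, if_neg hpn, if_pos h0, if_pos hC]
        · have hc1 : ¬ (s.getD i 0 = 0 ∧ p ∣ (start + (i : Int)) ∧ p * p ≤ start + (i : Int)) :=
            fun h => hC h.2
          rw [if_neg hc1, if_pos h0, if_pos h0, if_neg hC]
      · have hc1 : ¬ (s.getD i 0 = 0 ∧ p ∣ (start + (i : Int)) ∧ p * p ≤ start + (i : Int)) :=
          fun h => h0 h.1
        rw [if_neg hc1, if_neg h0, if_neg h0]

-- ===== VERDICT (by name: the statement is the Claim_ definition above) =====
theorem segmented_spf_spec : Claim_equal_segmented_spf := by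
  intro start end_ ps _ hpre
  unfold Spec_segmented_spf
  unfold segmented_spf segmented_spf_alt
  obtain ⟨hlen, hget⟩ := outerFold_char start end_ ps
    (List.replicate (end_ - start + 1).toNat 0)
    (fun p hp => ⟨(hpre p hp).1,
      fun hneg => neg_no_fire start end_ p hneg ((hpre p hp).2 hneg)⟩) (by simp)
  have hlenA : (ps.foldl (segSpfPrimeStep start end_) (List.replicate (end_ - start + 1).toNat 0)).length
      = (end_ - start + 1).toNat := by rw [hlen]; simp
  have hlenB : ((PySem.List.pyRange start (end_ + 1) 1).map (segSpfFirstHit ps)).length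
      = (end_ - start + 1).toNat := by
    rw [List.length_map, PySem.List.length_pyRange_one]
    congr 1; omega
  apply List.ext_getElem (by rw [hlenA, hlenB])
  intro i h1 h2
  have hiL : i < (end_ - start + 1).toNat := by rw [hlenA] at h1; exact h1
  have hA : (ps.foldl (segSpfPrimeStep start end_) (List.replicate (end_ - start + 1).toNat 0)).getD i 0
      = segSpfFirstHit ps (start + (i : Int)) := by
    rw [hget i (by simpa using hiL)]
    simp
  rw [← List.getD_eq_getElem _ 0 h1, hA]
  rw [List.getElem_map]
  congr 1
  rw [PySem.List.getElem_pyRange_one]
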